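-- pv_equiv track=rewrite | github.com/DashaII/NLG_Detailed_Inputs | flat_amr.py | clean_names_dict
-- ===== SOURCE A (Python) =====
-- import copy
--
-- def clean_names_dict(names_dict):
--     for key in names_dict:
--         name = names_dict[key]
--
--         words = name.split()[::-1]
--         words_copy = copy.deepcopy(words)
--
--         # remove one word before words in quotes or words before numbers
--         # example: govern city "Birmingham" -> govern "Birmingham"
--         # example: date-entity 1981 -> 1981
--         if len(words) > 1:
--             for i, word in enumerate(words):
--                 if i + 2 < len(words) and word[0] == '"' and words[i + 1][0] != '"' and words[i + 2][0] == '"':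
--                     words_copy[i + 1] = ','
--                 elif i + 1 < len(words) and word[0] == '"' and words[i + 1][0] != '"':
--                     words_copy[i + 1] = ''
--                 elif i + 1 < len(words) and word.isdigit() and words[i + 1][0] != '"' and not words[i + 1][0].isdigit():
--                     words_copy[i + 1] = ''
--         words = words_copy[::-1]
--
--         # remove empty lines
--         words = [word for word in words if word]
--         # make one line
--         words = " ".join(words)
--         # remove double quotes
--         words_str = words.replace('"', '')
--
--         names_dict[key] = words_str
--     return names_dict
-- ===== SOURCE B (Python) =====
-- def clean_names_dict(names_dict):
--     # One forward pass per name: keep/drop/replace words directly (no reversal,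
--     # no deepcopy, no marker array, no separate empty-filter pass).
--     for key in names_dict:
--         ws = names_dict[key].split()
--         kept = []
--         for j, w in enumerate(ws):
--             if j + 1 < len(ws):
--                 nxt = ws[j + 1]
--                 if nxt[0] == '"' and w[0] != '"':
--                     if j >= 1 and ws[j - 1][0] == '"':
--                         kept.append(',')
--                     # else: drop w
--                 elif nxt.isdigit() and w[0] != '"' and not w[0].isdigit():
--                     pass  # drop w
--                 else:
--                     kept.append(w)
--             else:
--                 kept.append(w)
--         names_dict[key] = " ".join(kept).replace('"', '')
--     return names_dict
-- ===== Notes on version B (the rewrite author's own statement) =====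
-- stated objective: simpler
-- what changed: Instead of reversing the word list, deep-copying it, marking words for deletion/replacement in the copy via reversed i+1/i+2 indices, reversing back and filtering out the marks, B makes one forward pass over name.split() that keeps, drops or replaces each word directly using j-1/j+1 neighbour checks.
import Mathlib
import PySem

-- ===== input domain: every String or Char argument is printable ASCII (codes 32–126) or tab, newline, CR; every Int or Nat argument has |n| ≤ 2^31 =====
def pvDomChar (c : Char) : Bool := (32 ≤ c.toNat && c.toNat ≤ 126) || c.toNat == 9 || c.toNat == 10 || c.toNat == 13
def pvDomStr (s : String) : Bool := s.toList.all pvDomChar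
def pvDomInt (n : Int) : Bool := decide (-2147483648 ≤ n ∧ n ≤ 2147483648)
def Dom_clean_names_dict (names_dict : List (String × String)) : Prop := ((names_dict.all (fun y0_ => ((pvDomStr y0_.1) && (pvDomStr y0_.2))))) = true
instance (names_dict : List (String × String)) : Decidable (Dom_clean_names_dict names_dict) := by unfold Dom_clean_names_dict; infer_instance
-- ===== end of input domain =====

-- B replaces A's reverse/deepcopy/mark/re-reverse/filter pipeline by one forward pass that
-- keeps, drops or replaces each word directly; equivalence is about the RETURN value (the
-- Python A mutates its dict argument in place, and so does the Python B).

-- word[0] as a total function: exact here because str.split() never yields an empty word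
-- (proved below in pvSplit₀_ne_empty).
def pvFirst (w : String) : Char := (PySem.Str.pyGet? w 0).getD ' '

-- ===== PORT A =====
-- one step of A's marking loop (the body of `for i, word in enumerate(words)`);
-- `iw.1` is i, `iw.2` is word
def pvStepA (words cpy : List String) (iw : Int × String) : List String :=
  if decide (iw.1 + 2 < PySem.List.len words) && (pvFirst iw.2 == '"')
      && !(pvFirst (PySem.List.pyGetD words (iw.1+1) "") == '"')
      && (pvFirst (PySem.List.pyGetD words (iw.1+2) "") == '"') then
    PySem.List.pySetD cpy (iw.1+1) ","
  else if decide (iw.1 + 1 < PySem.List.len words) && (pvFirst iw.2 == '"')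
      && !(pvFirst (PySem.List.pyGetD words (iw.1+1) "") == '"') then
    PySem.List.pySetD cpy (iw.1+1) ""
  else if decide (iw.1 + 1 < PySem.List.len words) && PySem.Str.strIsdigit iw.2
      && !(pvFirst (PySem.List.pyGetD words (iw.1+1) "") == '"')
      && !(PySem.Str.isdigit (pvFirst (PySem.List.pyGetD words (iw.1+1) ""))) then
    PySem.List.pySetD cpy (iw.1+1) ""
  else cpy

-- the body of A's `for key in names_dict` loop, for one name
def pvCleanA (name : String) : String :=
  let words := (PySem.Str.split₀ name).reverse        -- name.split()[::-1]
  let wordsCopy :=                                    -- copy.deepcopy + marking loop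
    if 1 < PySem.List.len words then
      (PySem.List.enumerate words).foldl (pvStepA words) words
    else words
  -- words = words_copy[::-1]; drop empties; join; strip double quotes
  PySem.Str.replace (PySem.Str.join " " ((wordsCopy.reverse).filter (fun word => word != ""))) "\"" ""

def clean_names_dict (names_dict : List (String × String)) : List (String × String) :=
  let d := PySem.Dict.ofList names_dict
  (d.keys.foldl (fun d key => d.insert key (pvCleanA (d.getD key ""))) d).items

-- ===== PORT B =====
-- one step of B's forward pass; `jw.1` is j, `jw.2` is w
def pvStepB (ws kept : List String) (jw : Int × String) : List String :=
  if decide (jw.1 + 1 < PySem.List.len ws) then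
    if (pvFirst (PySem.List.pyGetD ws (jw.1+1) "") == '"') && !(pvFirst jw.2 == '"') then
      if decide (1 ≤ jw.1) && (pvFirst (PySem.List.pyGetD ws (jw.1-1) "") == '"') then
        kept ++ [","]
      else kept                                       -- drop w
    else if PySem.Str.strIsdigit (PySem.List.pyGetD ws (jw.1+1) "")
        && !(pvFirst jw.2 == '"') && !(PySem.Str.isdigit (pvFirst jw.2)) then
      kept                                            -- drop w
    else kept ++ [jw.2]
  else kept ++ [jw.2]

-- the body of B's `for key in names_dict` loop, for one name
def pvCleanB (name : String) : String :=
  let ws := PySem.Str.split₀ name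
  let kept := (PySem.List.enumerate ws).foldl (pvStepB ws) []
  PySem.Str.replace (PySem.Str.join " " kept) "\"" ""

def clean_names_dict_alt (names_dict : List (String × String)) : List (String × String) :=
  let d := PySem.Dict.ofList names_dict
  (d.keys.foldl (fun d key => d.insert key (pvCleanB (d.getD key ""))) d).items

-- ===== PRECONDITION & SPEC =====
def Spec_clean_names_dict (names_dict : List (String × String)) (out : List (String × String)) : Prop := out = clean_names_dict_alt names_dict
instance (names_dict : List (String × String)) (out : List (String × String)) : Decidable (Spec_clean_names_dict names_dict out) := by unfold Spec_clean_names_dict; infer_instance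

-- ===== CLAIM (what is proved, stated in full; the proofs are below) =====
def Claim_equal_clean_names_dict : Prop := ∀ (names_dict : List (String × String)), Dom_clean_names_dict names_dict → Spec_clean_names_dict names_dict (clean_names_dict names_dict)

-- ===== LEMMAS AND PROOFS =====

-- value that A's marking pass writes at position i+1 of the copy (reversed indexing), if any
def pvWr (words : List String) (i : Int) (word : String) : Option String :=
  if decide (i + 2 < PySem.List.len words) && (pvFirst word == '"')
      && !(pvFirst (PySem.List.pyGetD words (i+1) "") == '"')
      && (pvFirst (PySem.List.pyGetD words (i+2) "") == '"') then some ","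
  else if decide (i + 1 < PySem.List.len words) && (pvFirst word == '"')
      && !(pvFirst (PySem.List.pyGetD words (i+1) "") == '"') then some ""
  else if decide (i + 1 < PySem.List.len words) && PySem.Str.strIsdigit word
      && !(pvFirst (PySem.List.pyGetD words (i+1) "") == '"')
      && !(PySem.Str.isdigit (pvFirst (PySem.List.pyGetD words (i+1) ""))) then some ""
  else none

lemma pvStepA_eq_wr (words cpy : List String) (p : Int × String) :
    pvStepA words cpy p =
      match pvWr words p.1 p.2 with
      | some v => PySem.List.pySetD cpy (p.1 + 1) v
      | none => cpy := by
  unfold pvStepA pvWr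
  split_ifs <;> rfl

-- forward-pass value at forward index j with word w (as a single word: "," / "" / w)
def pvVal (ws : List String) (j : Int) (w : String) : String :=
  if decide (j + 1 < PySem.List.len ws) then
    if (pvFirst (PySem.List.pyGetD ws (j+1) "") == '"') && !(pvFirst w == '"') then
      if decide (1 ≤ j) && (pvFirst (PySem.List.pyGetD ws (j-1) "") == '"') then "," else ""
    else if PySem.Str.strIsdigit (PySem.List.pyGetD ws (j+1) "")
        && !(pvFirst w == '"') && !(PySem.Str.isdigit (pvFirst w)) then ""
    else w
  else w

-- forward-pass emitted segment at forward index j (as a list segment: [","] / [] / [w])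
def pvEmit (ws : List String) (j : Int) (w : String) : List String :=
  if decide (j + 1 < PySem.List.len ws) then
    if (pvFirst (PySem.List.pyGetD ws (j+1) "") == '"') && !(pvFirst w == '"') then
      if decide (1 ≤ j) && (pvFirst (PySem.List.pyGetD ws (j-1) "") == '"') then [","] else []
    else if PySem.Str.strIsdigit (PySem.List.pyGetD ws (j+1) "")
        && !(pvFirst w == '"') && !(PySem.Str.isdigit (pvFirst w)) then []
    else [w]
  else [w]

lemma pvStepB_eq (ws kept : List String) (jw : Int × String) :
    pvStepB ws kept jw = kept ++ pvEmit ws jw.1 jw.2 := by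
  unfold pvStepB pvEmit
  split_ifs <;> simp

lemma pvEmit_eq_val (ws : List String) (j : Int) (w : String) (hw : w ≠ "") :
    pvEmit ws j w = if pvVal ws j w == "" then [] else [pvVal ws j w] := by
  unfold pvEmit pvVal
  by_cases h1 : decide (j + 1 < PySem.List.len ws) = true
  · rw [if_pos h1, if_pos h1]
    by_cases h2 : ((pvFirst (PySem.List.pyGetD ws (j+1) "") == '"') && !(pvFirst w == '"')) = true
    · rw [if_pos h2, if_pos h2]
      by_cases h3 : (decide (1 ≤ j) && (pvFirst (PySem.List.pyGetD ws (j-1) "") == '"')) = true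
      · rw [if_pos h3, if_pos h3]; simp
      · rw [if_neg h3, if_neg h3]; simp
    · rw [if_neg h2, if_neg h2]
      by_cases h4 : (PySem.Str.strIsdigit (PySem.List.pyGetD ws (j+1) "")
          && !(pvFirst w == '"') && !(PySem.Str.isdigit (pvFirst w))) = true
      · rw [if_pos h4, if_pos h4]; simp
      · rw [if_neg h4, if_neg h4]; simp [hw]
  · rw [if_neg h1, if_neg h1]; simp [hw]

-- words produced by str.split() are never empty
lemma pvGo_ne_nil : ∀ (s cur : List Char) (acc : List (List Char)),
    (∀ w ∈ acc, w ≠ []) → ∀ w ∈ PySem.Chars.split₀.go s cur acc, w ≠ [] := by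
  intro s
  induction s with
  | nil =>
      intro cur acc hacc w hw
      rw [PySem.Chars.split₀.go.eq_def] at hw
      by_cases hc : cur.isEmpty
      · simp [hc] at hw; exact hacc w hw
      · simp [hc] at hw
        rcases hw with h | h <;>
          first
            | exact hacc w h
            | (intro hnil; apply hc; rw [List.isEmpty_iff]
               rw [h] at hnil
               simpa using hnil)
  | cons c rest ih =>
      intro cur acc hacc w hw
      rw [PySem.Chars.split₀.go.eq_def] at hw
      by_cases hs : PySem.Chars.isspace c
      · by_cases hc : cur.isEmpty
        · simp [hs, hc] at hw; exact ih [] acc hacc w hw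
        · simp [hs, hc] at hw
          refine ih [] (cur.reverse :: acc) ?_ w hw
          intro u hu
          rcases List.mem_cons.mp hu with h | h <;>
            first
              | exact hacc u h
              | (intro hnil; apply hc; rw [List.isEmpty_iff]
                 rw [h] at hnil
                 simpa using hnil)
      · simp [hs] at hw
        exact ih (c :: cur) acc hacc w hw

lemma pvSplit₀_ne_empty (s : String) : ∀ w ∈ PySem.Str.split₀ s, w ≠ "" := by
  intro w hw
  have h1 : w.toList ∈ (PySem.Str.split₀ s).map String.toList := List.mem_map_of_mem hw
  rw [PySem.Str.split₀_map_toList] at h1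
  have h2 : w.toList ≠ [] := by
    have := pvGo_ne_nil s.toList [] [] (by simp)
    exact this _ (by simpa [PySem.Chars.split₀] using h1)
  intro h; exact h2 (by simp [h])

lemma pvFoldWr_length (words : List String) :
    ∀ (L : List (Int × String)) (c : List String),
      (L.foldl (pvStepA words) c).length = c.length := by
  intro L
  induction L with
  | nil => intro c; rfl
  | cons p L ih =>
      intro c
      rw [List.foldl_cons, ih, pvStepA_eq_wr]
      cases pvWr words p.1 p.2 <;> simp [PySem.List.length_pySetD]

-- a foldl of conditional single writes, elementwise: the (unique) writer for slot k decides it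
lemma pvFoldWr_get (words : List String) :
    ∀ (L : List (Int × String)) (c : List String) (k : Nat),
      (∀ p ∈ L, 0 ≤ p.1) → L.Pairwise (fun p q => p.1 < q.1) →
      (L.foldl (pvStepA words) c)[k]? =
        match L.find? (fun p => p.1 + 1 == (k : Int)) with
        | some p =>
            (match pvWr words p.1 p.2 with
             | some v => if k < c.length then some v else none
             | none => getElem? c k)
        | none => getElem? c k := by
  intro L
  induction L with
  | nil => intro c k _ _; rfl
  | cons p L ih =>
      intro c k hpos hpw
      have hp0 : (0:Int) ≤ p.1 := hpos p (by simp)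
      have hrest : ∀ q ∈ L, 0 ≤ q.1 := fun q hq => hpos q (by simp [hq])
      have hpw' : L.Pairwise (fun p q => p.1 < q.1) := hpw.of_cons
      rw [List.foldl_cons]
      by_cases hk : p.1 + 1 = (k : Int)
      · -- head is the writer for slot k; no later entry writes there
        have hnone : L.find? (fun q => q.1 + 1 == (k : Int)) = none := by
          rw [List.find?_eq_none]
          intro q hq
          have := (List.pairwise_cons.mp hpw).1 q hq
          simp only [beq_iff_eq]
          omega
        rw [ih _ k hrest hpw', hnone, List.find?_cons_of_pos (by simpa using hk), pvStepA_eq_wr]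
        cases hw : pvWr words p.1 p.2 with
        | none => simp only [hw]
        | some v =>
            simp only [hw]
            rw [hk, PySem.List.pySetD_natCast]
            by_cases hlt : k < c.length
            · rw [List.getElem?_set_self (by simpa using hlt), if_pos hlt]
            · rw [if_neg hlt]
              exact List.getElem?_eq_none (by simp; omega)
      · -- head writes elsewhere; slot k is untouched by it
        have hstep : (pvStepA words c p)[k]? = getElem? c k := by
          rw [pvStepA_eq_wr]
          cases hw : pvWr words p.1 p.2 with
          | none => rfl
          | some v =>
              show (PySem.List.pySetD c (p.1 + 1) v)[k]? = getElem? c k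
              have hm : p.1 + 1 = (((p.1+1).toNat : Nat) : Int) := by omega
              rw [hm, PySem.List.pySetD_natCast]
              exact List.getElem?_set_ne (by omega)
        have hlen : (pvStepA words c p).length = c.length := by
          rw [pvStepA_eq_wr]
          cases pvWr words p.1 p.2 <;> simp [PySem.List.length_pySetD]
        rw [ih _ k hrest hpw', List.find?_cons_of_neg (by simpa using hk), hlen, hstep]

-- find? over enumerate: the unique entry with index k-1
lemma pvFind_enumerate (r : List String) :
    ∀ (s k : Int),
      (PySem.List.enumerate r s).find? (fun p => p.1 + 1 == k) =
        if s + 1 ≤ k then (r[(k - 1 - s).toNat]?).map (fun w => (k - 1, w)) else none := by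
  induction r with
  | nil =>
      intro s k
      rw [PySem.List.enumerate_nil]
      simp only [List.find?_nil]
      split_ifs <;> simp
  | cons x xs ih =>
      intro s k
      rw [PySem.List.enumerate_cons]
      by_cases hk : s + 1 = k
      · rw [List.find?_cons_of_pos (by simpa using hk)]
        have h0 : (k - 1 - s).toNat = 0 := by omega
        have h1 : k - 1 = s := by omega
        rw [if_pos (by omega : s + 1 ≤ k), h0]
        simp [h1]
      · rw [List.find?_cons_of_neg (by simpa using hk), ih (s+1) k]
        by_cases h2 : s + 1 + 1 ≤ k
        · have hle : s + 1 ≤ k := by omega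
          have hix : (k - 1 - s).toNat = (k - 1 - (s+1)).toNat + 1 := by omega
          rw [if_pos h2, if_pos hle, hix]
          simp
        · by_cases h1 : s + 1 ≤ k
          · omega
          · rw [if_neg h2, if_neg h1]

lemma pvFoldA_get? (r : List String) (k : Nat) :
    ((PySem.List.enumerate r).foldl (pvStepA r) r)[k]? =
      if 1 ≤ k ∧ k < r.length then
        some ((pvWr r ((k:Int) - 1) (r.getD (k-1) "")).getD (r.getD k ""))
      else r[k]? := by
  have hpos : ∀ p ∈ PySem.List.enumerate r, (0:Int) ≤ p.1 := by
    intro p hp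
    rcases (PySem.List.mem_enumerate_iff _ _ _).mp hp with ⟨m, hm, rfl⟩
    simp
  rw [pvFoldWr_get r (PySem.List.enumerate r) r k hpos (PySem.List.pairwise_lt_enumerate r 0)]
  rw [pvFind_enumerate r 0 k]
  by_cases hk1 : 1 ≤ k
  · rw [if_pos (by omega : (0:Int) + 1 ≤ (k:Int))]
    have hix : ((k:Int) - 1 - 0).toNat = k - 1 := by omega
    rw [hix]
    by_cases hk2 : k - 1 < r.length
    · rw [List.getElem?_eq_getElem hk2, Option.map_some]
      have hgd : r.getD (k-1) "" = r[k-1] := by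
        rw [List.getD_eq_getElem?_getD, List.getElem?_eq_getElem hk2]; rfl
      rw [hgd]
      have key : ∀ (o : Option String),
          (match o with
           | some v => if k < r.length then some v else none
           | none => getElem? r k) =
          if 1 ≤ k ∧ k < r.length then some (o.getD (r.getD k "")) else getElem? r k := by
        intro o
        cases o with
        | some v =>
            show (if k < r.length then some v else none) =
              if 1 ≤ k ∧ k < r.length then some ((some v).getD (r.getD k "")) else getElem? r k
            by_cases hk3 : k < r.length
            · rw [if_pos hk3, if_pos ⟨hk1, hk3⟩]
              rfl
            · rw [if_neg hk3, if_neg (by omega), List.getElem?_eq_none (by omega : r.length ≤ k)]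
        | none =>
            show getElem? r k =
              if 1 ≤ k ∧ k < r.length then some ((none : Option String).getD (r.getD k "")) else getElem? r k
            by_cases hk3 : k < r.length
            · rw [if_pos ⟨hk1, hk3⟩, List.getElem?_eq_getElem hk3,
                List.getD_eq_getElem?_getD, List.getElem?_eq_getElem hk3]
              rfl
            · rw [if_neg (by omega)]
      exact key _
    · -- k - 1 out of range, hence k out of range too
      rw [List.getElem?_eq_none (by omega), if_neg (by omega)]
      try rfl
  · rw [if_neg (by omega : ¬((0:Int) + 1 ≤ (k:Int))), if_neg (by omega)]
    try rfl

-- translate getD on the reversed list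
lemma pvRevGetD (ws : List String) (m : Nat) (hm : m < ws.length) :
    ws.reverse.getD m "" = ws.getD (ws.length - 1 - m) "" := by
  rw [List.getD_eq_getElem?_getD, List.getD_eq_getElem?_getD,
    List.getElem?_reverse (by simpa using hm)]

-- the value A leaves at forward index i equals B's forward decision (the heart of the proof)
lemma pvWrVal (ws : List String) (i : Nat) (hi1 : i + 1 < ws.length) :
    (pvWr ws.reverse ((↑(ws.length - 1 - i) : Int) - 1) (ws.getD (i+1) "")).getD (ws.getD i "") =
      pvVal ws (↑i) (ws.getD i "") := by
  have hn : PySem.List.len ws.reverse = (ws.length : Int) := by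
    simp [PySem.List.len_eq]
  unfold pvWr pvVal
  rw [hn]
  -- normalise the two reversed-list index expressions to Nat casts
  have e1 : ((↑(ws.length - 1 - i) : Int) - 1 + 1) = ((ws.length - 1 - i : Nat) : Int) := by omega
  have e2 : ((↑(ws.length - 1 - i) : Int) - 1 + 2) = ((ws.length - i : Nat) : Int) := by omega
  rw [e1, e2, PySem.List.pyGetD_natCast, PySem.List.pyGetD_natCast]
  have g1 : ws.reverse.getD (ws.length - 1 - i) "" = ws.getD i "" := by
    rw [pvRevGetD ws _ (by omega)]
    congr 1
    omega
  rw [g1]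
  have d2 : (decide ((↑(ws.length - 1 - i) : Nat) < (ws.length:Int))) = true := by
    simp only [decide_eq_true_eq]
    omega
  have d3 : (decide ((i:Int) + 1 < PySem.List.len ws)) = true := by
    simp only [PySem.List.len_eq, decide_eq_true_eq]; omega
  rw [d2, d3, if_pos rfl]
  have p1 : PySem.List.pyGetD ws ((i:Int) + 1) "" = ws.getD (i+1) "" := by
    have h : ((i:Int) + 1) = ((i+1 : Nat) : Int) := by omega
    rw [h, PySem.List.pyGetD_natCast]
  rw [p1]
  by_cases hi0 : 1 ≤ i
  · have d1 : (decide ((↑(ws.length - i) : Nat) < (ws.length:Int))) = true := by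
      simp only [decide_eq_true_eq]
      omega
    have g2 : ws.reverse.getD (ws.length - i) "" = ws.getD (i-1) "" := by
      rw [pvRevGetD ws _ (by omega)]
      congr 1
      omega
    have d4 : (decide (1 ≤ (i:Int))) = true := by
      simp only [decide_eq_true_eq]; omega
    have p2 : PySem.List.pyGetD ws ((i:Int) - 1) "" = ws.getD (i-1) "" := by
      have h : ((i:Int) - 1) = ((i-1 : Nat) : Int) := by omega
      rw [h, PySem.List.pyGetD_natCast]
    rw [d1, g2, d4, p2]
    generalize ws.getD (i+1) "" = w1
    generalize ws.getD (i-1) "" = w2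
    generalize ws.getD i "" = w0
    cases hq1 : (pvFirst w1 == '"') <;>
      cases hq2 : (pvFirst w0 == '"') <;>
        cases hq3 : (pvFirst w2 == '"') <;>
          cases hb1 : PySem.Str.strIsdigit w1 <;>
            cases hb2 : PySem.Str.isdigit (pvFirst w0) <;>
              simp [hq1, hq2, hq3, hb1, hb2]
  · have hi0' : i = 0 := by omega
    subst hi0'
    have d1 : (decide ((↑(ws.length - 0) : Nat) < (ws.length:Int))) = false := by
      simp only [decide_eq_false_iff_not]
      omega
    have d4 : (decide ((1:Int) ≤ ((0:Nat):Int))) = false := by decide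
    rw [d1, d4]
    generalize ws.getD (0+1) "" = w1
    generalize ws.getD 0 "" = w0
    cases hq1 : (pvFirst w1 == '"') <;>
      cases hq2 : (pvFirst w0 == '"') <;>
        cases hb1 : PySem.Str.strIsdigit w1 <;>
          cases hb2 : PySem.Str.isdigit (pvFirst w0) <;>
            simp [hq1, hq2, hb1, hb2]

-- A's marked-and-reversed word list is exactly the map of B's forward decision
lemma pvCopyRev (ws : List String) :
    ((PySem.List.enumerate ws.reverse).foldl (pvStepA ws.reverse) ws.reverse).reverse =
      (PySem.List.enumerate ws).map (fun p => pvVal ws p.1 p.2) := by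
  have hlenf : ((PySem.List.enumerate ws.reverse).foldl (pvStepA ws.reverse) ws.reverse).length
      = ws.length := by
    rw [pvFoldWr_length]; simp
  apply List.ext_getElem?
  intro i
  by_cases hi : i < ws.length
  · rw [List.getElem?_reverse (by omega), hlenf, List.getElem?_map, PySem.List.getElem?_enumerate,
      List.getElem?_eq_getElem hi, Option.map_some]
    have hmap : Option.map (fun p => pvVal ws p.1 p.2) (some ((0:Int) + ↑i, ws[i])) =
        some (pvVal ws ((0:Int) + ↑i) ws[i]) := rfl
    rw [hmap]
    rw [pvFoldA_get? ws.reverse (ws.length - 1 - i)]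
    have hval : pvVal ws ((0:Int) + ↑i) ws[i] = pvVal ws (↑i) (ws.getD i "") := by
      have h1 : ((0:Int) + ↑i) = (↑i : Int) := by omega
      have h2 : ws[i] = ws.getD i "" := by
        rw [List.getD_eq_getElem?_getD, List.getElem?_eq_getElem hi]; rfl
      rw [h1, h2]
    rw [hval]
    by_cases hi1 : i + 1 < ws.length
    · rw [if_pos (by simp only [List.length_reverse]; omega :
        1 ≤ ws.length - 1 - i ∧ ws.length - 1 - i < ws.reverse.length)]
      have hg1 : ws.reverse.getD (ws.length - 1 - i - 1) "" = ws.getD (i+1) "" := by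
        rw [pvRevGetD ws _ (by omega)]
        congr 1
        omega
      have hg2 : ws.reverse.getD (ws.length - 1 - i) "" = ws.getD i "" := by
        rw [pvRevGetD ws _ (by omega)]
        congr 1
        omega
      rw [hg1, hg2, pvWrVal ws i hi1]
    · -- i is the last word: untouched, and B keeps it
      have hk0 : ws.length - 1 - i = 0 := by omega
      rw [hk0, if_neg (by omega)]
      rw [List.getElem?_reverse (by omega)]
      have : ws.length - 1 - 0 = i := by omega
      rw [this, List.getElem?_eq_getElem hi]
      have hvv : pvVal ws (↑i) (ws.getD i "") = ws.getD i "" := by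
        unfold pvVal
        rw [if_neg (by simp only [PySem.List.len_eq, decide_eq_true_eq]; omega)]
      rw [hvv]
      congr 1
      rw [List.getD_eq_getElem?_getD, List.getElem?_eq_getElem hi]
      rfl
  · rw [List.getElem?_eq_none (by simpa [hlenf] using (by omega : ws.length ≤ i)),
      List.getElem?_eq_none (by simp [PySem.List.length_enumerate]; omega)]

-- a filtered map is the flatMap of conditional singletons
lemma pvFilter_map_flat (f : Int × String → String) :
    ∀ (l : List (Int × String)),
      (l.map f).filter (fun word => word != "") =
        l.flatMap (fun p => if f p == "" then [] else [f p]) := by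
  intro l
  induction l with
  | nil => rfl
  | cons p l ih =>
      by_cases h : f p = "" <;> simp [h, ih]

-- A's size-guard is a no-op: on 0 or 1 words the marking loop changes nothing
lemma pvGuardA (r : List String) :
    (if 1 < PySem.List.len r then (PySem.List.enumerate r).foldl (pvStepA r) r else r) =
      (PySem.List.enumerate r).foldl (pvStepA r) r := by
  by_cases h : 1 < PySem.List.len r
  · rw [if_pos h]
  · rw [if_neg h]
    simp only [PySem.List.len_eq] at h
    rcases r with _ | ⟨a, _ | ⟨b, t⟩⟩
    · rw [PySem.List.enumerate_nil]; rfl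
    · rw [PySem.List.enumerate_cons, PySem.List.enumerate_nil, List.foldl_cons, List.foldl_nil,
        pvStepA_eq_wr]
      have : pvWr [a] 0 a = none := by
        unfold pvWr
        rw [if_neg (by simp [PySem.List.len_eq]), if_neg (by simp [PySem.List.len_eq]),
          if_neg (by simp [PySem.List.len_eq])]
      rw [this]
    · exfalso
      simp at h

theorem pvClean_eq (name : String) : pvCleanA name = pvCleanB name := by
  simp only [pvCleanA, pvCleanB]
  rw [pvGuardA, pvCopyRev (PySem.Str.split₀ name)]
  have hfun : pvStepB (PySem.Str.split₀ name) =
      fun kept jw => kept ++ pvEmit (PySem.Str.split₀ name) jw.1 jw.2 :=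
    funext fun kept => funext fun jw => pvStepB_eq _ kept jw
  rw [hfun, PySem.List.foldl_append_eq_flatMap]
  rw [pvFilter_map_flat]
  congr 2
  apply List.flatMap_congr
  intro p hp
  have hmem : p.2 ∈ PySem.Str.split₀ name := by
    rcases (PySem.List.mem_enumerate_iff _ _ _).mp hp with ⟨k, hk, rfl⟩
    exact List.getElem_mem hk
  rw [pvEmit_eq_val _ _ _ (pvSplit₀_ne_empty name _ hmem)]

-- ===== VERDICT (by name: the statement is the Claim_ definition above) =====
theorem clean_names_dict_spec : Claim_equal_clean_names_dict := by
  intro names_dict _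
  unfold Spec_clean_names_dict clean_names_dict clean_names_dict_alt
  have h : pvCleanA = pvCleanB := funext pvClean_eq
  rw [h]
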